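-- pv_equiv track=rewrite | github.com/qaisarkhan123/IRAQAF-Integrated-Regulatory-Compliant-Quality-Assurance-Framework | dashboard/metrics_calculations.py | classify_alert_priority
-- ===== SOURCE A (Python) =====
-- from typing import Dict, List, Tuple, Optional, Any
--
-- def classify_alert_priority(alerts: List[Dict]) -> Dict[str, List[Dict]]:
--     """Classify alerts by priority for dashboard display"""
--     classified = {
--         "critical": [],
--         "warning": [],
--         "info": []
--     }
--
--     for alert in alerts:
--         severity = alert.get("severity", "info")
--         if severity in classified:
--             classified[severity].append(alert)
--
--     return classified
-- ===== SOURCE B (Python) =====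
-- def classify_alert_priority(alerts):
--     """Classify alerts by priority: three filtered scans instead of one dispatch loop."""
--     critical = [a for a in alerts if a.get("severity", "info") == "critical"]
--     warning = [a for a in alerts if a.get("severity", "info") == "warning"]
--     info = [a for a in alerts if a.get("severity", "info") == "info"]
--     return {"critical": critical, "warning": warning, "info": info}
-- ===== Notes on version B (the rewrite author's own statement) =====
-- stated objective: alternative
-- what changed: Replaces the single-pass dispatch into a mutable three-bucket dict by three independent filtered scans of the list, one per severity, assembled into the result dict literal.
import Mathlib
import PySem

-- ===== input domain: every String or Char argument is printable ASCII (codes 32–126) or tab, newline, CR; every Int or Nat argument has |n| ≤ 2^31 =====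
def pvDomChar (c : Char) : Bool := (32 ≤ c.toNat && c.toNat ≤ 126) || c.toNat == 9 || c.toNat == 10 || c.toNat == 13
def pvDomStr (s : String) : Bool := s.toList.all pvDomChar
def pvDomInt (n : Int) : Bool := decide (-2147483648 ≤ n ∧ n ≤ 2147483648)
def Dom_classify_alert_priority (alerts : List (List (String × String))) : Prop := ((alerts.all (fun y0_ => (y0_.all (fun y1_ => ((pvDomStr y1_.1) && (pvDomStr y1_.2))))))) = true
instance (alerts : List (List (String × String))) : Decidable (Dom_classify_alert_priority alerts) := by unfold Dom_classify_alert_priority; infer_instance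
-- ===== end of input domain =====

-- B differs from A by decomposition only: three filtered scans instead of one dispatch loop; same values.

-- alert.get("severity", "info")  (used by both ports)
def pvSev (alert : List (String × String)) : String :=
  (PySem.Dict.mk alert).getD "severity" "info"

-- ===== PORT A =====
-- one pass: dispatch each alert into the mutable bucket dict (append only if the key exists)
def classify_alert_priority (alerts : List (List (String × String))) : List (String × List (List (String × String))) :=
  let classified : PySem.Dict String (List (List (String × String))) :=
    PySem.Dict.mk [("critical", []), ("warning", []), ("info", [])]
  let final := alerts.foldl (fun d alert =>
    let severity := pvSev alert
    if d.contains severity then d.modify severity [] (fun l => l ++ [alert]) else d) classified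
  final.items

-- ===== PORT B =====
-- three independent filtered scans, one per severity
def classify_alert_priority_alt (alerts : List (List (String × String))) : List (String × List (List (String × String))) :=
  let critical := alerts.filter (fun a => pvSev a == "critical")
  let warning := alerts.filter (fun a => pvSev a == "warning")
  let info := alerts.filter (fun a => pvSev a == "info")
  [("critical", critical), ("warning", warning), ("info", info)]

-- ===== PRECONDITION & SPEC =====
def Spec_classify_alert_priority (alerts : List (List (String × String))) (out : List (String × List (List (String × String)))) : Prop := out = classify_alert_priority_alt alerts
instance (alerts : List (List (String × String))) (out : List (String × List (List (String × String)))) : Decidable (Spec_classify_alert_priority alerts out) := by unfold Spec_classify_alert_priority; infer_instance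

-- ===== CLAIM (what is proved, stated in full; the proofs are below) =====
def Claim_equal_classify_alert_priority : Prop := ∀ (alerts : List (List (String × String))), Dom_classify_alert_priority alerts → Spec_classify_alert_priority alerts (classify_alert_priority alerts)

-- ===== LEMMAS AND PROOFS =====

-- one dispatch step of A's loop on the three-bucket dict, evaluated per severity
theorem pv_step (a : List (String × String)) (c w i : List (List (String × String))) :
    (if (PySem.Dict.mk [("critical", c), ("warning", w), ("info", i)]).contains (pvSev a)
     then (PySem.Dict.mk [("critical", c), ("warning", w), ("info", i)]).modify (pvSev a) [] (fun l => l ++ [a])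
     else PySem.Dict.mk [("critical", c), ("warning", w), ("info", i)]) =
    PySem.Dict.mk [("critical", if pvSev a = "critical" then c ++ [a] else c),
                   ("warning", if pvSev a = "warning" then w ++ [a] else w),
                   ("info", if pvSev a = "info" then i ++ [a] else i)] := by
  by_cases hc : pvSev a = "critical"
  · simp [hc, PySem.Dict.modify, PySem.Dict.contains, PySem.Dict.getD, PySem.Dict.get?,
          PySem.Dict.insert]
  · by_cases hw : pvSev a = "warning"
    · simp [hw, PySem.Dict.modify, PySem.Dict.contains, PySem.Dict.getD, PySem.Dict.get?,
            PySem.Dict.insert]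
    · by_cases hi : pvSev a = "info"
      · simp [hi, PySem.Dict.modify, PySem.Dict.contains, PySem.Dict.getD, PySem.Dict.get?,
              PySem.Dict.insert]
      · have hcont : (PySem.Dict.mk [("critical", c), ("warning", w), ("info", i)]).contains (pvSev a) = false := by
          simp [PySem.Dict.contains]
          exact ⟨fun h => hc h.symm, fun h => hw h.symm, fun h => hi h.symm⟩
        simp [hcont, hc, hw, hi]

-- loop invariant: folding A's dispatch step over l from bucket contents c/w/i
-- appends exactly the matching filters of l to each bucket
theorem pv_inv (l : List (List (String × String))) (c w i : List (List (String × String))) :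
    l.foldl (fun d alert =>
        let severity := pvSev alert
        if d.contains severity then d.modify severity [] (fun l => l ++ [alert]) else d)
      (PySem.Dict.mk [("critical", c), ("warning", w), ("info", i)]) =
    PySem.Dict.mk [("critical", c ++ l.filter (fun a => pvSev a == "critical")),
                   ("warning", w ++ l.filter (fun a => pvSev a == "warning")),
                   ("info", i ++ l.filter (fun a => pvSev a == "info"))] := by
  induction l generalizing c w i with
  | nil => simp
  | cons a t ih =>
    simp only [List.foldl_cons, List.filter_cons]
    rw [pv_step, ih]
    split_ifs with hc hw hi <;> simp_all

-- ===== VERDICT (by name: the statement is the Claim_ definition above) =====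
theorem classify_alert_priority_spec : Claim_equal_classify_alert_priority := by
  intro alerts _
  unfold Spec_classify_alert_priority classify_alert_priority classify_alert_priority_alt
  simp only [pv_inv, List.nil_append]
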